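-- pv_equiv track=rewrite | github.com/hs-4419/URL-Shortener | script.py | id_to_short_url
-- ===== SOURCE A (Python) =====
-- def id_to_short_url(n):
--     """Encodes a positive integer into a short Base62 string."""
--     if n == 0:
--         return '0'
--     alphabet = "0123456789abcdefghijklmnopqrstuvwxyzABCDEFGHIJKLMNOPQRSTUVWXYZ"
--     base = len(alphabet)
--     s = ""
--
--     while n > 0:
--         s += alphabet[n % base]
--         n //= base
--     return s[::-1] # Reverse the string
-- ===== SOURCE B (Python) =====
-- def id_to_short_url(n):
--     """Encodes a positive integer into a short Base62 string."""
--     if n == 0: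
--         return '0'
--     if n < 0:
--         return ''
--     alphabet = "0123456789abcdefghijklmnopqrstuvwxyzABCDEFGHIJKLMNOPQRSTUVWXYZ"
--     # find the largest power of 62 not exceeding n
--     p = 1
--     while p * 62 <= n:
--         p *= 62
--     # extract digits most-significant-first; no reversal needed
--     digits = []
--     while p > 0:
--         digits.append(alphabet[n // p % 62])
--         n %= p
--         p //= 62
--     return ''.join(digits)
-- ===== Notes on version B (the rewrite author's own statement) =====
-- stated objective: alternative
-- what changed: Replaces A's least-significant-digit accumulation loop plus final string reversal with a power-based conversion: first find the largest power of the base not exceeding n, then peel digits most-significant-first by division and remainder, joining them in output order.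
import Mathlib
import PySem

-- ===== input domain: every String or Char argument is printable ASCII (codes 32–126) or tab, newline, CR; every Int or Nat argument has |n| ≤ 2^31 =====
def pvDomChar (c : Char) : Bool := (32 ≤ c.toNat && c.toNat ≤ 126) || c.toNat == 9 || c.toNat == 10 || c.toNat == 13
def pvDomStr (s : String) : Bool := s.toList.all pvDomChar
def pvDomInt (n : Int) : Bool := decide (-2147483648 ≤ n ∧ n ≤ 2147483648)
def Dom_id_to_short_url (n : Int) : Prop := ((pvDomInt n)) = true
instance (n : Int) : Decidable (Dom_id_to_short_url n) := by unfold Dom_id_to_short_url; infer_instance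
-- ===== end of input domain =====

-- B replaces A's least-significant-first accumulate-then-reverse loop with a
-- power-of-62 scan that emits digits most-significant-first (return values only).

-- ===== PORT A =====
def pvAlphabet : List Char :=
  "0123456789abcdefghijklmnopqrstuvwxyzABCDEFGHIJKLMNOPQRSTUVWXYZ".toList

-- A's while loop: s += alphabet[n % base]; n //= base (index always in [0,62), so getD's default is never used)
def aLoop (n : Int) (s : List Char) : List Char :=
  if _h : 0 < n then
    aLoop (PySem.Int.floordiv n 62) (s ++ [pvAlphabet.getD (PySem.Int.mod n 62).toNat ' '])
  else s
termination_by n.toNat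
decreasing_by
  rw [PySem.Int.floordiv_eq_ediv_of_pos (by omega : (0:Int) < 62)]
  omega

def id_to_short_url (n : Int) : String :=
  if n = 0 then "0"
  else String.mk (aLoop n []).reverse   -- s[::-1]

-- ===== PORT B =====
-- first while loop: p = 1; while p * 62 <= n: p *= 62
-- (the 0 < p conjunct is a totality guard only: p starts at 1 and only grows)
def bPow (p n : Int) : Int :=
  if _h : 0 < p ∧ p * 62 ≤ n then bPow (p * 62) n else p
termination_by (n - p).toNat
decreasing_by omega

-- second while loop: while p > 0: digits.append(alphabet[n // p % 62]); n %= p; p //= 62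
def bDigits (p n : Int) : List Char :=
  if _h : 0 < p then
    pvAlphabet.getD (PySem.Int.mod (PySem.Int.floordiv n p) 62).toNat ' '
      :: bDigits (PySem.Int.floordiv p 62) (PySem.Int.mod n p)
  else []
termination_by p.toNat
decreasing_by
  rw [PySem.Int.floordiv_eq_ediv_of_pos (by omega : (0:Int) < 62)]
  omega

def id_to_short_url_alt (n : Int) : String :=
  if n = 0 then "0"
  else if n < 0 then ""
  else String.mk (bDigits (bPow 1 n) n)   -- ''.join(digits)

-- ===== PRECONDITION & SPEC =====
def Spec_id_to_short_url (n : Int) (out : String) : Prop := out = id_to_short_url_alt n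
instance (n : Int) (out : String) : Decidable (Spec_id_to_short_url n out) := by unfold Spec_id_to_short_url; infer_instance

-- ===== CLAIM (what is proved, stated in full; the proofs are below) =====
def Claim_equal_id_to_short_url : Prop := ∀ (n : Int), Dom_id_to_short_url n → Spec_id_to_short_url n (id_to_short_url n)

-- ===== LEMMAS AND PROOFS =====

-- mathematical most-significant-first digit list (proof-side reference function)
def pvMsd (m : Int) : List Char :=
  if h : m ≤ 0 then []
  else pvMsd (m / 62) ++ [pvAlphabet.getD (m % 62).toNat ' ']
termination_by m.toNat
decreasing_by omega

-- fixed-width (w digits, least-significant defined last) reference function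
def pvFw : Nat → Int → List Char
  | 0, _ => []
  | w + 1, n => pvFw w (n / 62) ++ [pvAlphabet.getD (n % 62).toNat ' ']

theorem aLoop_reverse (n : Int) (s : List Char) :
    (aLoop n s).reverse = pvMsd n ++ s.reverse := by
  by_cases h : 0 < n
  · rw [aLoop, dif_pos h, pvMsd, dif_neg (by omega),
      PySem.Int.floordiv_eq_ediv_of_pos (by omega : (0:Int) < 62),
      PySem.Int.mod_eq_emod_of_pos (by omega : (0:Int) < 62)]
    rw [aLoop_reverse (n / 62)]
    simp
  · rw [aLoop, dif_neg h, pvMsd, dif_pos (by omega)]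
    simp
termination_by n.toNat
decreasing_by omega

-- bPow 1 n is the largest power of 62 not exceeding n (for 1 ≤ n)
theorem bPow_spec (p n : Int) (k : Nat) (hp : p = 62 ^ k) (hle : p ≤ n) :
    ∃ j : Nat, bPow p n = 62 ^ j ∧ 62 ^ j ≤ n ∧ n < 62 ^ (j + 1) := by
  have hp0 : 0 < p := hp ▸ pow_pos (by omega) k
  by_cases h : p * 62 ≤ n
  · rw [bPow, dif_pos ⟨hp0, h⟩]
    exact bPow_spec (p * 62) n (k + 1) (by rw [hp]; ring) h
  · rw [bPow, dif_neg (by tauto)]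
    exact ⟨k, hp, hp ▸ hle, by rw [pow_succ, ← hp]; omega⟩
termination_by (n - p).toNat
decreasing_by omega

-- digit-peeling identity: taking the top digit at position w commutes with pvFw
theorem pvFw_top (w : Nat) (n : Int) (hn : 0 ≤ n) :
    pvAlphabet.getD ((n / 62 ^ w) % 62).toNat ' ' :: pvFw w (n % 62 ^ w)
      = pvFw w (n / 62) ++ [pvAlphabet.getD (n % 62).toNat ' '] := by
  induction w generalizing n with
  | zero => simp [pvFw]
  | succ w ih =>
    have h62 : (0:Int) < 62 := by omega
    have hpow : (0:Int) < 62 ^ w := pow_pos h62 w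
    have e1 : n % 62 ^ (w + 1) % 62 = n % 62 :=
      Int.emod_emod_of_dvd n (dvd_pow_self 62 (Nat.succ_ne_zero w))
    have e2 : n % 62 ^ (w + 1) / 62 = n / 62 % 62 ^ w := by
      rw [show (62:Int) ^ (w + 1) = 62 * 62 ^ w by ring]
      rw [Int.emod_def n (62 * 62 ^ w)]
      rw [show n - 62 * 62 ^ w * (n / (62 * 62 ^ w))
          = n + 62 * (-(62 ^ w * (n / (62 * 62 ^ w)))) by ring]
      rw [Int.add_mul_ediv_left n _ (by omega : (62:Int) ≠ 0)]
      rw [Int.emod_def (n / 62) (62 ^ w), Int.ediv_ediv_of_nonneg (by omega : (0:Int) ≤ 62)]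
      ring
    rw [show pvFw (w + 1) (n % 62 ^ (w + 1))
        = pvFw w (n % 62 ^ (w + 1) / 62) ++ [pvAlphabet.getD ((n % 62 ^ (w + 1) % 62)).toNat ' '] from rfl]
    rw [e1, e2]
    have e3 : n / 62 ^ (w + 1) = n / 62 / 62 ^ w := by
      rw [Int.ediv_ediv_of_nonneg (le_of_lt h62), ← pow_succ']
    rw [e3, ← List.cons_append, ih (n / 62) (Int.ediv_nonneg hn (by omega))]
    rfl

-- bDigits at p = 62 ^ k produces the fixed-width (k+1)-digit representation
theorem bDigits_eq_fw (k : Nat) (n : Int) (hn : 0 ≤ n) :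
    bDigits (62 ^ k) n = pvFw (k + 1) n := by
  induction k generalizing n with
  | zero =>
    rw [pow_zero, bDigits, dif_pos (by norm_num : (0:Int) < 1)]
    rw [show PySem.Int.floordiv n 1 = n by
      rw [PySem.Int.floordiv_eq_ediv_of_pos (by norm_num)]; exact Int.ediv_one n]
    rw [show PySem.Int.floordiv 1 62 = 0 by decide]
    rw [PySem.Int.mod_eq_emod_of_pos (by norm_num : (0:Int) < 62)]
    rw [bDigits, dif_neg (by norm_num)]
    simp [pvFw]
  | succ k ih =>
    have hpk : (0:Int) < 62 ^ k := pow_pos (by omega) k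
    have hp : (0:Int) < 62 ^ (k + 1) := pow_pos (by omega) (k + 1)
    rw [bDigits, dif_pos hp,
      PySem.Int.floordiv_eq_ediv_of_pos hp,
      PySem.Int.mod_eq_emod_of_pos hp,
      PySem.Int.floordiv_eq_ediv_of_pos (by omega : (0:Int) < 62),
      PySem.Int.mod_eq_emod_of_pos (by omega : (0:Int) < 62)]
    have e4 : (62:Int) ^ (k + 1) / 62 = 62 ^ k := by
      rw [pow_succ, Int.mul_ediv_cancel _ (by omega)]
    rw [e4, ih _ (Int.emod_nonneg n (by positivity))]
    exact pvFw_top (k + 1) n hn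

-- a fixed-width representation with no leading zero equals pvMsd
theorem pvFw_eq_msd (k : Nat) (n : Int) (hlo : 62 ^ k ≤ n) (hhi : n < 62 ^ (k + 1)) :
    pvFw (k + 1) n = pvMsd n := by
  induction k generalizing n with
  | zero =>
    have h1 : (1:Int) ≤ n := by simpa using hlo
    rw [pvMsd, dif_neg (by omega)]
    have hd : n / 62 = 0 := Int.ediv_eq_zero_of_lt (by omega) (by simpa using hhi)
    rw [hd, show pvMsd 0 = [] by rw [pvMsd, dif_pos (le_refl 0)]]
    simp [pvFw]
  | succ k ih =>
    have h62 : (0:Int) < 62 := by omega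
    have hpk : (0:Int) < 62 ^ k := pow_pos h62 k
    have hn0 : 0 < n := lt_of_lt_of_le (pow_pos h62 (k+1)) hlo
    rw [pvMsd, dif_neg (by omega)]
    rw [show pvFw (k + 2) n = pvFw (k + 1) (n / 62) ++ [pvAlphabet.getD (n % 62).toNat ' '] from rfl]
    rw [ih (n / 62) ?_ ?_]
    · rw [Int.le_ediv_iff_mul_le h62, ← pow_succ]; exact hlo
    · rw [Int.ediv_lt_iff_lt_mul h62, ← pow_succ]; exact hhi

-- ===== VERDICT (by name: the statement is the Claim_ definition above) =====
theorem id_to_short_url_spec : Claim_equal_id_to_short_url := by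
  intro n _
  unfold Spec_id_to_short_url id_to_short_url id_to_short_url_alt
  by_cases h0 : n = 0
  · simp [h0]
  · rw [if_neg h0, if_neg h0]
    by_cases hneg : n < 0
    · rw [if_pos hneg, aLoop, dif_neg (by omega)]
      rfl
    · rw [if_neg hneg]
      have hn1 : (1:Int) ≤ n := by omega
      obtain ⟨j, hbp, hlo, hhi⟩ := bPow_spec 1 n 0 (by norm_num) hn1
      rw [hbp, bDigits_eq_fw j n (by omega), pvFw_eq_msd j n hlo hhi,
        aLoop_reverse n []]
      simp
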